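-- pv_equiv track=rewrite | github.com/insung8150/AgentWebSearch-MCP | search_agent.py | _is_low_quality_domain
-- ===== SOURCE A (Python) =====
-- LOW_QUALITY_DOMAIN_SUFFIXES = {
--     "blog.naver.com",
--     "m.blog.naver.com",
--     "post.naver.com",
--     "cafe.naver.com",
--     "tistory.com",
--     "brunch.co.kr",
--     "medium.com",
--     "reddit.com",
--     "youtube.com",
--     "youtu.be",
-- }
--
-- def _is_low_quality_domain(domain: str) -> bool:
--     if not domain:
--         return False
--     if domain in LOW_QUALITY_DOMAIN_SUFFIXES:
--         return True
--     for suffix in LOW_QUALITY_DOMAIN_SUFFIXES: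
--         if domain.endswith("." + suffix):
--             return True
--     return False
-- ===== SOURCE B (Python) =====
-- LOW_QUALITY_DOMAIN_SUFFIXES = {
--     "blog.naver.com",
--     "m.blog.naver.com",
--     "post.naver.com",
--     "cafe.naver.com",
--     "tistory.com",
--     "brunch.co.kr",
--     "medium.com",
--     "reddit.com",
--     "youtube.com",
--     "youtu.be",
-- }
--
-- def _is_low_quality_domain(domain: str) -> bool:
--     # Generate the domain's own dot-boundary tails (the full domain, plus the
--     # substring after each '.') and test them against the suffix set.
--     candidates = [domain]
--     for i, ch in enumerate(domain):
--         if ch == '.':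
--             candidates.append(domain[i + 1:])
--     return any(c in LOW_QUALITY_DOMAIN_SUFFIXES for c in candidates)
-- ===== Notes on version B (the rewrite author's own statement) =====
-- stated objective: alternative
-- what changed: Instead of scanning the fixed suffix set and calling endswith for each entry, B generates the domain's own dot-boundary tails (the full domain plus the substring after each '.') and tests each candidate for set membership.
import Mathlib
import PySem

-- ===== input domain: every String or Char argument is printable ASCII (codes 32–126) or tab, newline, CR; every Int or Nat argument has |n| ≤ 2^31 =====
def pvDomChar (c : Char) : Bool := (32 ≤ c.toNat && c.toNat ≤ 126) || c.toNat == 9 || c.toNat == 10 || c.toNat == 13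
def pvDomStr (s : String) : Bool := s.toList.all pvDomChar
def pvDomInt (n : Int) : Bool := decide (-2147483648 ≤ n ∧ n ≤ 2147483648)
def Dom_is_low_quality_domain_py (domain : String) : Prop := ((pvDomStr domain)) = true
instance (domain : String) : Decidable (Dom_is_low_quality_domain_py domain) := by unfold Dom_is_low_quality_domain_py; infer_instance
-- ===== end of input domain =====

-- B replaces A's scan of the suffix set with endswith by generating the domain's
-- own dot-boundary tails and testing set membership (alternative decomposition).


-- ===== PORT A =====
-- LOW_QUALITY_DOMAIN_SUFFIXES (a set of string literals; order irrelevant to both programs)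
def pvSuffixes : List (List Char) :=
  [ "blog.naver.com".toList, "m.blog.naver.com".toList, "post.naver.com".toList,
    "cafe.naver.com".toList, "tistory.com".toList, "brunch.co.kr".toList,
    "medium.com".toList, "reddit.com".toList, "youtube.com".toList, "youtu.be".toList ]

def is_low_quality_domain_py (domain : String) : Bool :=
  let d := domain.toList
  if d = [] then false
  else if pvSuffixes.contains d then true
  else pvSuffixes.any (fun suf => PySem.Chars.endswith d ('.' :: suf))

-- ===== PORT B =====
-- the tails of d that start immediately after a '.' (B's loop over enumerate(domain))
def pvDotTails : List Char → List (List Char)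
  | [] => []
  | c :: rest => (if c = '.' then [rest] else []) ++ pvDotTails rest

def is_low_quality_domain_py_alt (domain : String) : Bool :=
  (domain.toList :: pvDotTails domain.toList).any (fun c => pvSuffixes.contains c)

-- ===== PRECONDITION & SPEC =====
def Spec_is_low_quality_domain_py (domain : String) (out : Bool) : Prop := out = is_low_quality_domain_py_alt domain
instance (domain : String) (out : Bool) : Decidable (Spec_is_low_quality_domain_py domain out) := by unfold Spec_is_low_quality_domain_py; infer_instance

-- ===== CLAIM (what is proved, stated in full; the proofs are below) =====
def Claim_equal_is_low_quality_domain_py : Prop := ∀ (domain : String), Dom_is_low_quality_domain_py domain → Spec_is_low_quality_domain_py domain (is_low_quality_domain_py domain)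

-- ===== LEMMAS AND PROOFS =====

lemma mem_pvDotTails (d s : List Char) : s ∈ pvDotTails d ↔ ('.' :: s) <:+ d := by
  induction d with
  | nil => simp [pvDotTails]
  | cons c rest ih =>
    by_cases hc : c = '.'
    · subst hc
      simp [pvDotTails, List.suffix_cons_iff, ih]
    · simp only [pvDotTails, if_neg hc, List.nil_append, ih, List.suffix_cons_iff]
      constructor
      · exact Or.inr
      · rintro (he | h)
        · cases he; exact absurd rfl hc
        · exact h

lemma main_list (d : List Char) :
    (if d = [] then false
     else if pvSuffixes.contains d then true
     else pvSuffixes.any (fun suf => PySem.Chars.endswith d ('.' :: suf)))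
    = (d :: pvDotTails d).any (fun c => pvSuffixes.contains c) := by
  rcases eq_or_ne d [] with rfl | hne
  · decide
  · rw [if_neg hne, Bool.eq_iff_iff]
    by_cases hd : d ∈ pvSuffixes
    · simp [hd]
    · simp [hd, List.any_eq_true, PySem.Chars.endswith_iff, mem_pvDotTails]
      tauto

-- ===== VERDICT (by name: the statement is the Claim_ definition above) =====
theorem is_low_quality_domain_py_spec : Claim_equal_is_low_quality_domain_py := by
  intro domain _
  unfold Spec_is_low_quality_domain_py is_low_quality_domain_py is_low_quality_domain_py_alt
  exact main_list domain.toList
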